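-- pv_equiv track=rewrite | github.com/YannickSchini/advent_of_code | day_16/day_16.py | get_invalid_value
-- ===== SOURCE A (Python) =====
-- def get_invalid_value(ticket, rules):
--     for value in ticket:
--         is_value_valid = []
--         for field in rules.keys():
--             if value not in rules[field]:
--                 is_value_valid.append(False)
--             else:
--                 is_value_valid.append(True)
--         if True not in is_value_valid:
--             return value
--     return None
-- ===== SOURCE B (Python) =====
-- def get_invalid_value(ticket, rules):
--     valid = set()
--     for field_range in rules.values():
--         valid |= set(field_range)
--     for value in ticket:
--         if value not in valid:
--             return value
--     return None
-- ===== Notes on version B (the rewrite author's own statement) =====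
-- stated objective: alternative
-- what changed: B precomputes one set that is the union of all rules' value ranges and then makes a single membership pass over the ticket, replacing A's per-value scan over every rule with list membership and a boolean list; Pre_ excludes association lists with duplicate field names, which cannot arise from a Python dict.
import Mathlib
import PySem

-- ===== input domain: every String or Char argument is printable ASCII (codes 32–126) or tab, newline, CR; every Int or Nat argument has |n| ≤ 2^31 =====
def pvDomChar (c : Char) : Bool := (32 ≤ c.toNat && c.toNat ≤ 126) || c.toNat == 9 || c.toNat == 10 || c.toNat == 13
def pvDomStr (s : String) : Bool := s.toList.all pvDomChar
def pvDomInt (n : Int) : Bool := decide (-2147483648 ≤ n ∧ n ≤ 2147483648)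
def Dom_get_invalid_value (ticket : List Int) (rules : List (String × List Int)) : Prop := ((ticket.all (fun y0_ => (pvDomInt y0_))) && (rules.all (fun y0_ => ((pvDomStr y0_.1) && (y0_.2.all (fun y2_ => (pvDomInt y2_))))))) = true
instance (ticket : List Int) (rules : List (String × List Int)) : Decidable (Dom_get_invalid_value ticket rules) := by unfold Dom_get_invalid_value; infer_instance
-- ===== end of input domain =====

-- B builds one set that is the union of all rules' ranges and makes a single
-- membership pass over the ticket, instead of A's per-value scan over every rule.

-- ===== PORT A =====
-- rules[field]: first-match lookup in the association list (Python dict lookup)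
def pyRulesGet (rules : List (String × List Int)) (field : String) : List Int :=
  (PySem.Dict.mk rules).getD field []

-- the inner loop: is_value_valid built by appending, over rules.keys()
def aBools (value : Int) (rules : List (String × List Int)) : List Bool :=
  (rules.map Prod.fst).foldl
    (fun acc field =>
      if value ∉ pyRulesGet rules field then acc ++ [false] else acc ++ [true]) []

def get_invalid_value (ticket : List Int) (rules : List (String × List Int)) : Option Int :=
  match ticket with
  | [] => none
  | value :: rest =>
    let is_value_valid : List Bool := aBools value rules
    if true ∉ is_value_valid then some value else get_invalid_value rest rules

-- ===== PORT B =====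
-- B's first loop: the union of all rules' ranges
def validSet (rules : List (String × List Int)) : PySem.Set Int :=
  rules.foldl (fun s p => PySem.Set.union s p.2) PySem.Set.empty

-- B's second loop: first ticket value not in the valid set
def firstNotIn (ticket : List Int) (valid : PySem.Set Int) : Option Int :=
  match ticket with
  | [] => none
  | value :: rest =>
    if PySem.Set.contains valid value then firstNotIn rest valid else some value

def get_invalid_value_alt (ticket : List Int) (rules : List (String × List Int)) : Option Int :=
  firstNotIn ticket (validSet rules)

-- ===== PRECONDITION & SPEC =====
-- Pre_ excludes association lists with duplicate field names, which cannot arise from a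
-- Python dict (A's first-match lookup through a duplicated key is a modelling artefact).
def Pre_get_invalid_value (ticket : List Int) (rules : List (String × List Int)) : Prop :=
  (rules.map Prod.fst).Nodup
instance (ticket : List Int) (rules : List (String × List Int)) : Decidable (Pre_get_invalid_value ticket rules) := by unfold Pre_get_invalid_value; infer_instance

def pvWitness_get_invalid_value : List Int × (List (String × List Int)) :=
  ([3, 7, 50], [("row", [1, 2, 3]), ("seat", [7, 8])])

def Spec_get_invalid_value (ticket : List Int) (rules : List (String × List Int)) (out : Option Int) : Prop := out = get_invalid_value_alt ticket rules
instance (ticket : List Int) (rules : List (String × List Int)) (out : Option Int) : Decidable (Spec_get_invalid_value ticket rules out) := by unfold Spec_get_invalid_value; infer_instance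

-- ===== CLAIM (what is proved, stated in full; the proofs are below) =====
def Claim_equal_get_invalid_value : Prop := ∀ (ticket : List Int) (rules : List (String × List Int)), Dom_get_invalid_value ticket rules → Pre_get_invalid_value ticket rules → Spec_get_invalid_value ticket rules (get_invalid_value ticket rules)

-- ===== LEMMAS AND PROOFS =====

-- true occurs in A's boolean list iff some checked field's range contains value
theorem true_mem_foldl (value : Int) (rules : List (String × List Int))
    (fields : List String) (acc : List Bool) :
    (true ∈ fields.foldl
        (fun acc field =>
          if value ∉ pyRulesGet rules field then acc ++ [false] else acc ++ [true]) acc)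
      ↔ true ∈ acc ∨ ∃ f ∈ fields, value ∈ pyRulesGet rules f := by
  induction fields generalizing acc with
  | nil => simp
  | cons f fs ih =>
    rw [List.foldl_cons]
    by_cases h : value ∈ pyRulesGet rules f
    · rw [if_neg (by simpa using h), ih]
      simp only [List.exists_mem_cons_iff, List.mem_append, List.mem_singleton]
      tauto
    · rw [if_pos h, ih]
      simp only [List.exists_mem_cons_iff, List.mem_append, List.mem_singleton]
      have : value ∉ pyRulesGet rules f := h
      tauto

-- under unique keys, looking a present key up returns its paired range
theorem pyRulesGet_of_mem (rules : List (String × List Int))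
    (hnd : (rules.map Prod.fst).Nodup) (field : String) (fr : List Int)
    (hmem : (field, fr) ∈ rules) : pyRulesGet rules field = fr := by
  induction rules with
  | nil => simp at hmem
  | cons p ps ih =>
    obtain ⟨k, v⟩ := p
    simp only [List.map_cons, List.nodup_cons] at hnd
    rcases List.mem_cons.mp hmem with h | h
    · rw [Prod.mk.injEq] at h
      obtain ⟨rfl, rfl⟩ := h
      simp [pyRulesGet, PySem.Dict.getD, PySem.Dict.get?_mk_cons]
    · have hne : k ≠ field := by
        intro he
        exact hnd.1 (he ▸ (List.mem_map.mpr ⟨(field, fr), h, rfl⟩))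
      have := ih hnd.2 h
      simpa [pyRulesGet, PySem.Dict.getD, PySem.Dict.get?_mk_cons, hne] using this

-- membership in B's union accumulator
theorem mem_foldl_union (rules : List (String × List Int)) (s : PySem.Set Int) (v : Int) :
    (v ∈ rules.foldl (fun s p => PySem.Set.union s p.2) s)
      ↔ v ∈ s ∨ ∃ p ∈ rules, v ∈ p.2 := by
  induction rules generalizing s with
  | nil => simp
  | cons p ps ih =>
    rw [List.foldl_cons, ih]
    simp only [PySem.Set.mem_union, List.exists_mem_cons_iff]
    tauto

theorem mem_validSet (rules : List (String × List Int)) (v : Int) :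
    v ∈ validSet rules ↔ ∃ p ∈ rules, v ∈ p.2 := by
  rw [validSet, mem_foldl_union]
  simp [PySem.Set.empty]

theorem true_mem_aBools (value : Int) (rules : List (String × List Int))
    (hnd : (rules.map Prod.fst).Nodup) :
    true ∈ aBools value rules ↔ ∃ p ∈ rules, value ∈ p.2 := by
  rw [aBools, true_mem_foldl]
  simp only [List.not_mem_nil, false_or]
  constructor
  · rintro ⟨f, hf, hv⟩
    rcases List.mem_map.mp hf with ⟨p, hp, rfl⟩
    have := pyRulesGet_of_mem rules hnd p.1 p.2 (by simpa using hp)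
    exact ⟨p, hp, this ▸ hv⟩
  · rintro ⟨p, hp, hv⟩
    exact ⟨p.1, List.mem_map.mpr ⟨p, hp, rfl⟩,
      (pyRulesGet_of_mem rules hnd p.1 p.2 (by simpa using hp)) ▸ hv⟩

theorem main_eq (ticket : List Int) (rules : List (String × List Int))
    (hnd : (rules.map Prod.fst).Nodup) :
    get_invalid_value ticket rules = get_invalid_value_alt ticket rules := by
  induction ticket with
  | nil => rfl
  | cons value rest ih =>
    rw [get_invalid_value, get_invalid_value_alt, firstNotIn]
    rw [get_invalid_value_alt] at ih
    by_cases h : ∃ p ∈ rules, value ∈ p.2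
    · have hc : PySem.Set.contains (validSet rules) value = true := by
        rw [PySem.Set.contains_iff, mem_validSet]; exact h
      have hb : true ∈ aBools value rules := (true_mem_aBools value rules hnd).mpr h
      rw [if_pos hc, if_neg (by simpa using hb)]
      exact ih
    · have hc : ¬ PySem.Set.contains (validSet rules) value = true := by
        rw [PySem.Set.contains_iff, mem_validSet]; exact h
      have hb : true ∉ aBools value rules := fun hb =>
        h ((true_mem_aBools value rules hnd).mp hb)
      rw [if_neg hc, if_pos hb]

-- ===== VERDICT (by name: the statement is the Claim_ definition above) =====
theorem get_invalid_value_spec : Claim_equal_get_invalid_value := by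
  intro ticket rules _ hpre
  exact main_eq ticket rules hpre
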